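-- pv_equiv track=rewrite | github.com/Incent-Health/Info | Incent-Health-Bot/responses.py | positive_activities
-- ===== SOURCE A (Python) =====
-- Question3 = """ Did you smoke today? (Enter Yes or No.) Remember that your care team is not here to judge you, they are here to help.  A \'Yes\' answer to this question will NOT harm you in any shape or form """
--
-- def positive_activities(sentence):
--     sentence = [word.lower() for word in sentence.split()]
--     nicotine_substitution = ['nicotine', 'patch']
--     socializing = ['friend', 'friends', 'buddy', 'buddies', 'family', 'companion', 'companions', 'classmate', 'workmate']
--     excercise = ['excercise', 'yoga', 'meditation', 'weight', 'music', 'book', ]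
--     working = ['work']
--     D={}
--     positive_activities = ['nicotine_patch', 'socializing', 'working', 'excercise', 'other_positive']
--     for x in positive_activities:
--         D[x] = 0
--     if any(str(x) in sentence for x in nicotine_substitution):
--         D['nicotine_patch']= 1
--
--     if any(str(x) in sentence for x in socializing):
--         D['socializing'] = 1
--
--     if any(str(x) in sentence for x in excercise):
--         D['excercise']  = 1
--
--     if any(str(x) in sentence for x in working):
--         D['working'] = 1
--
--     if not any(D[x] == 1 for x in ['nicotine_patch', 'socializing', 'working', 'excercise']):
--         D['other_positive']  = 1
--
--     return ('Great!' + Question3, 5, positive_activities, [D[x] for x in positive_activities])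
-- ===== SOURCE B (Python) =====
-- Question3 = """ Did you smoke today? (Enter Yes or No.) Remember that your care team is not here to judge you, they are here to help.  A \'Yes\' answer to this question will NOT harm you in any shape or form """
--
-- _TABLE = {
--     'nicotine': 'nicotine_patch', 'patch': 'nicotine_patch',
--     'friend': 'socializing', 'friends': 'socializing', 'buddy': 'socializing',
--     'buddies': 'socializing', 'family': 'socializing', 'companion': 'socializing',
--     'companions': 'socializing', 'classmate': 'socializing', 'workmate': 'socializing',
--     'excercise': 'excercise', 'yoga': 'excercise', 'meditation': 'excercise',
--     'weight': 'excercise', 'music': 'excercise', 'book': 'excercise',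
--     'work': 'working',
-- }
--
-- def positive_activities(sentence):
--     seen = set()
--     for word in sentence.split():
--         cat = _TABLE.get(word.lower())
--         if cat is not None:
--             seen.add(cat)
--     acts = ['nicotine_patch', 'socializing', 'working', 'excercise']
--     flags = [1 if c in seen else 0 for c in acts]
--     flags.append(0 if any(flags) else 1)
--     return ('Great!' + Question3, 5, acts + ['other_positive'], flags)
-- ===== Notes on version B (the rewrite author's own statement) =====
-- stated objective: idiomatic
-- what changed: Replaces the four separate any()-scans over keyword lists and the dict of flags with one keyword->category lookup table and a single pass over the words collecting the set of categories seen.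
import Mathlib
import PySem

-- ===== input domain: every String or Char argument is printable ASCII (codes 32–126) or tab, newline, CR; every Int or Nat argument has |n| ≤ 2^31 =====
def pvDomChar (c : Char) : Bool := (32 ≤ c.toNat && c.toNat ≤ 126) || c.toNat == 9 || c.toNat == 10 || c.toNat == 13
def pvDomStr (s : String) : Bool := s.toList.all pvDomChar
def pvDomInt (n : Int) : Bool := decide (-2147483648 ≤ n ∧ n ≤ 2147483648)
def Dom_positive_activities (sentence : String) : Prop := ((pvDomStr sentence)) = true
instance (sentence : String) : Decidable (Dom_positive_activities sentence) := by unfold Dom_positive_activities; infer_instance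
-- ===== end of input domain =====

-- B replaces A's four separate any()-scans over keyword lists with one keyword->category table
-- and a single pass over the words collecting the set of categories seen (objective: idiomatic).

def pvQuestion3 : String := " Did you smoke today? (Enter Yes or No.) Remember that your care team is not here to judge you, they are here to help.  A 'Yes' answer to this question will NOT harm you in any shape or form "

-- ===== PORT A =====
def positive_activities (sentence : String) : String × Int × List String × List Int :=
  let words := (PySem.Str.split₀ sentence).map PySem.Str.lower
  let nicotine_substitution := ["nicotine", "patch"]
  let socializing := ["friend", "friends", "buddy", "buddies", "family", "companion", "companions", "classmate", "workmate"]
  let excercise := ["excercise", "yoga", "meditation", "weight", "music", "book"]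
  let working := ["work"]
  let pa := ["nicotine_patch", "socializing", "working", "excercise", "other_positive"]
  let D := pa.foldl (fun d x => d.insert x (0 : Int)) (PySem.Dict.empty)
  let D := if nicotine_substitution.any (fun x => words.contains x) then D.insert "nicotine_patch" 1 else D
  let D := if socializing.any (fun x => words.contains x) then D.insert "socializing" 1 else D
  let D := if excercise.any (fun x => words.contains x) then D.insert "excercise" 1 else D
  let D := if working.any (fun x => words.contains x) then D.insert "working" 1 else D
  let D := if !(["nicotine_patch", "socializing", "working", "excercise"].any (fun x => D.getD x 0 == 1)) then D.insert "other_positive" 1 else D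
  ("Great!" ++ pvQuestion3, 5, pa, pa.map (fun x => D.getD x 0))

-- ===== PORT B =====
def pvTable : PySem.Dict String String := PySem.Dict.ofList
  [("nicotine", "nicotine_patch"), ("patch", "nicotine_patch"),
   ("friend", "socializing"), ("friends", "socializing"), ("buddy", "socializing"),
   ("buddies", "socializing"), ("family", "socializing"), ("companion", "socializing"),
   ("companions", "socializing"), ("classmate", "socializing"), ("workmate", "socializing"),
   ("excercise", "excercise"), ("yoga", "excercise"), ("meditation", "excercise"),
   ("weight", "excercise"), ("music", "excercise"), ("book", "excercise"),
   ("work", "working")]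

def positive_activities_alt (sentence : String) : String × Int × List String × List Int :=
  let seen := (PySem.Str.split₀ sentence).foldl
    (fun s w => match pvTable.get? (PySem.Str.lower w) with
                | some cat => PySem.Set.add s cat
                | none => s) PySem.Set.empty
  let acts := ["nicotine_patch", "socializing", "working", "excercise"]
  let flags := acts.map (fun c => if PySem.Set.contains seen c then (1 : Int) else 0)
  let flags := flags ++ [if flags.any (fun x => decide (x ≠ 0)) then (0 : Int) else 1]
  ("Great!" ++ pvQuestion3, 5, acts ++ ["other_positive"], flags)

-- ===== PRECONDITION & SPEC =====
def Spec_positive_activities (sentence : String) (out : String × Int × List String × List Int) : Prop := out = positive_activities_alt sentence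
instance (sentence : String) (out : String × Int × List String × List Int) : Decidable (Spec_positive_activities sentence out) := by unfold Spec_positive_activities; infer_instance

-- ===== CLAIM (what is proved, stated in full; the proofs are below) =====
def Claim_equal_positive_activities : Prop := ∀ (sentence : String), Dom_positive_activities sentence → Spec_positive_activities sentence (positive_activities sentence)

-- ===== LEMMAS AND PROOFS =====

theorem pv_get?_mk_eq_some_iff {ν : Type} [DecidableEq ν] (l : List (String × ν)) (w : String) (c : ν)
    (h : (l.map Prod.fst).Nodup) :
    (PySem.Dict.mk l).get? w = some c ↔ (w, c) ∈ l := by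
  induction l with
  | nil => simp [PySem.Dict.get?]
  | cons p t ih =>
    obtain ⟨k, v⟩ := p
    simp only [List.map_cons, List.nodup_cons] at h
    rw [PySem.Dict.get?_mk_cons]
    by_cases hk : k = w
    · subst hk
      simp only [beq_self_eq_true, if_true, List.mem_cons]
      constructor
      · intro hv; cases Option.some.inj hv; exact Or.inl rfl
      · rintro (hp | hp)
        · have h2 := congrArg Prod.snd hp; simp only at h2; rw [h2]
        · exact absurd (List.mem_map.mpr ⟨_, hp, rfl⟩) h.1
    · simp only [beq_iff_eq, hk, if_false, List.mem_cons]
      rw [ih h.2]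
      constructor
      · exact Or.inr
      · rintro (hp | hp)
        · exact absurd (congrArg Prod.fst hp).symm hk
        · exact hp

theorem pvTable_mk : pvTable = PySem.Dict.mk
  [("nicotine", "nicotine_patch"), ("patch", "nicotine_patch"),
   ("friend", "socializing"), ("friends", "socializing"), ("buddy", "socializing"),
   ("buddies", "socializing"), ("family", "socializing"), ("companion", "socializing"),
   ("companions", "socializing"), ("classmate", "socializing"), ("workmate", "socializing"),
   ("excercise", "excercise"), ("yoga", "excercise"), ("meditation", "excercise"),
   ("weight", "excercise"), ("music", "excercise"), ("book", "excercise"),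
   ("work", "working")] := by decide

theorem pv_cat_nic (w : String) : pvTable.get? w = some "nicotine_patch" ↔ w ∈ ["nicotine", "patch"] := by
  rw [pvTable_mk, pv_get?_mk_eq_some_iff _ _ _ (by decide)]; simp [Prod.ext_iff]

theorem pv_cat_soc (w : String) : pvTable.get? w = some "socializing" ↔ w ∈ ["friend", "friends", "buddy", "buddies", "family", "companion", "companions", "classmate", "workmate"] := by
  rw [pvTable_mk, pv_get?_mk_eq_some_iff _ _ _ (by decide)]; simp [Prod.ext_iff]

theorem pv_cat_exc (w : String) : pvTable.get? w = some "excercise" ↔ w ∈ ["excercise", "yoga", "meditation", "weight", "music", "book"] := by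
  rw [pvTable_mk, pv_get?_mk_eq_some_iff _ _ _ (by decide)]; simp [Prod.ext_iff]

theorem pv_cat_wrk (w : String) : pvTable.get? w = some "working" ↔ w ∈ ["work"] := by
  rw [pvTable_mk, pv_get?_mk_eq_some_iff _ _ _ (by decide)]; simp [Prod.ext_iff]

theorem pv_any_comm (l m : List String) :
    m.any (fun x => l.contains x) = l.any (fun x => m.contains x) := by
  rw [Bool.eq_iff_iff]
  simp only [List.any_eq_true, List.contains_iff_mem]
  exact ⟨fun ⟨x, h1, h2⟩ => ⟨x, h2, h1⟩, fun ⟨x, h1, h2⟩ => ⟨x, h2, h1⟩⟩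

theorem pv_seen_mem (ws : List String) (s : PySem.Set String) (c : String) :
    (c ∈ ws.foldl (fun s w => match pvTable.get? w with
                | some cat => PySem.Set.add s cat
                | none => s) s) ↔
      (c ∈ s ∨ ∃ w ∈ ws, pvTable.get? w = some c) := by
  induction ws generalizing s with
  | nil => simp
  | cons w ws ih =>
    simp only [List.foldl_cons, List.mem_cons]
    cases hg : pvTable.get? w with
    | none =>
      rw [ih]
      constructor
      · rintro (h | h)
        · exact Or.inl h
        · exact Or.inr (let ⟨x, hx, hh⟩ := h; ⟨x, Or.inr hx, hh⟩)
      · rintro (h | ⟨x, (rfl | hx), hh⟩)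
        · exact Or.inl h
        · rw [hg] at hh; cases hh
        · exact Or.inr ⟨x, hx, hh⟩
    | some cat =>
      rw [ih]
      simp only [PySem.Set.mem_add]
      constructor
      · rintro ((h | rfl) | h)
        · exact Or.inl h
        · exact Or.inr ⟨w, Or.inl rfl, hg⟩
        · exact Or.inr (let ⟨x, hx, hh⟩ := h; ⟨x, Or.inr hx, hh⟩)
      · rintro (h | ⟨x, (rfl | hx), hh⟩)
        · exact Or.inl (Or.inl h)
        · rw [hg] at hh; exact Or.inl (Or.inr (Option.some.inj hh).symm)
        · exact Or.inr ⟨x, hx, hh⟩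

theorem pv_seen_contains (ws : List String) (c : String) (kws : List String)
    (h : ∀ w, pvTable.get? w = some c ↔ w ∈ kws) :
    PySem.Set.contains (ws.foldl (fun s w => match pvTable.get? w with
                | some cat => PySem.Set.add s cat
                | none => s) PySem.Set.empty) c
      = kws.any (fun x => ws.contains x) := by
  rw [← pv_any_comm, Bool.eq_iff_iff, PySem.Set.contains_iff, pv_seen_mem]
  simp only [List.any_eq_true, List.contains_iff_mem, PySem.Set.empty]
  simp [h]

theorem pv_fold_lower (ws : List String) (s : PySem.Set String) :
    ws.foldl (fun s w => match pvTable.get? (PySem.Str.lower w) with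
                | some cat => PySem.Set.add s cat
                | none => s) s
      = (ws.map PySem.Str.lower).foldl (fun s w => match pvTable.get? w with
                | some cat => PySem.Set.add s cat
                | none => s) s := by rw [List.foldl_map]

theorem pv_c1 (ws : List String) :
    PySem.Set.contains (ws.foldl (fun s w => match pvTable.get? w with
                | some cat => PySem.Set.add s cat
                | none => s) PySem.Set.empty) "nicotine_patch"
      = ["nicotine", "patch"].any (fun x => ws.contains x) := pv_seen_contains ws _ _ pv_cat_nic

theorem pv_c2 (ws : List String) :
    PySem.Set.contains (ws.foldl (fun s w => match pvTable.get? w with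
                | some cat => PySem.Set.add s cat
                | none => s) PySem.Set.empty) "socializing"
      = ["friend", "friends", "buddy", "buddies", "family", "companion", "companions", "classmate", "workmate"].any (fun x => ws.contains x) := pv_seen_contains ws _ _ pv_cat_soc

theorem pv_c3 (ws : List String) :
    PySem.Set.contains (ws.foldl (fun s w => match pvTable.get? w with
                | some cat => PySem.Set.add s cat
                | none => s) PySem.Set.empty) "working"
      = ["work"].any (fun x => ws.contains x) := pv_seen_contains ws _ _ pv_cat_wrk

theorem pv_c4 (ws : List String) :
    PySem.Set.contains (ws.foldl (fun s w => match pvTable.get? w with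
                | some cat => PySem.Set.add s cat
                | none => s) PySem.Set.empty) "excercise"
      = ["excercise", "yoga", "meditation", "weight", "music", "book"].any (fun x => ws.contains x) := pv_seen_contains ws _ _ pv_cat_exc

-- ===== VERDICT (by name: the statement is the Claim_ definition above) =====
set_option maxRecDepth 8192 in
theorem positive_activities_spec : Claim_equal_positive_activities := by
  intro sentence _
  show positive_activities sentence = positive_activities_alt sentence
  simp only [positive_activities, positive_activities_alt]
  rw [pv_fold_lower]
  generalize (PySem.Str.split₀ sentence).map PySem.Str.lower = words
  simp only [List.map_cons, List.map_nil]
  simp only [pv_c1, pv_c2, pv_c3, pv_c4]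
  generalize (["nicotine", "patch"].any fun x => words.contains x) = b1
  generalize (["friend", "friends", "buddy", "buddies", "family", "companion", "companions", "classmate", "workmate"].any fun x => words.contains x) = b2
  generalize (["work"].any fun x => words.contains x) = b3
  generalize (["excercise", "yoga", "meditation", "weight", "music", "book"].any fun x => words.contains x) = b4
  cases b1 <;> cases b2 <;> cases b3 <;> cases b4 <;> decide
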